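-- pv_equiv track=rewrite | github.com/shikhar394/MalURL | FeatureEngineering.py | IP_URL
-- ===== SOURCE A (Python) =====
-- def IP_URL(URL_Tokens):
--     Count = 0
--     for Token in URL_Tokens:
--         if Token.isnumeric():
--             Count += 1
--         else:
--             Count = 0
--
--         if Count >= 4:
--             return 1
--     return 0
-- ===== SOURCE B (Python) =====
-- def IP_URL(URL_Tokens):
--     # Decompose the token stream into maximal runs of equal "is numeric" flag,
--     # then answer 1 iff some numeric run has length >= 4.
--     flags = [t.isnumeric() for t in URL_Tokens]
--     groups = []
--     i = 0
--     while i < len(flags):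
--         j = i
--         while j < len(flags) and flags[j] == flags[i]:
--             j += 1
--         groups.append((flags[i], j - i))
--         i = j
--     return 1 if any(k and n >= 4 for (k, n) in groups) else 0
-- ===== Notes on version B (the rewrite author's own statement) =====
-- stated objective: alternative
-- what changed: Replaces A's single-pass reset counter with early return by a run-length decomposition: map tokens to numeric flags, group maximal equal-flag runs, and test whether any numeric run has length >= 4.
import Mathlib
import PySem

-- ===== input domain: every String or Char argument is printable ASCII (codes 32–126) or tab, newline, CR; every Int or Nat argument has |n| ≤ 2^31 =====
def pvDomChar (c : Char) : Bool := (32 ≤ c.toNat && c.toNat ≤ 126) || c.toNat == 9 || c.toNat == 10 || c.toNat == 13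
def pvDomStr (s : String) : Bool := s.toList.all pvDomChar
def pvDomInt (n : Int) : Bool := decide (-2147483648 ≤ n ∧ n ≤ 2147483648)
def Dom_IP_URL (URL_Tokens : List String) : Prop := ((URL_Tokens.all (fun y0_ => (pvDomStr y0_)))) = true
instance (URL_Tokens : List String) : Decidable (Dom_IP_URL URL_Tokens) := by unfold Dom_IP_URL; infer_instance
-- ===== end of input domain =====

-- B replaces A's reset-counter scan by a run-length (groupby-style) decomposition; same value everywhere (alternative, not faster).
-- On the ASCII domain str.isnumeric() coincides with str.isdigit(), ported as PySem.Str.strIsdigit (exact there).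

-- ===== PORT A =====
def IP_URL_loop (Count : Int) : List String → Int
  | [] => 0
  | Token :: rest =>
    let Count' := if PySem.Str.strIsdigit Token then Count + 1 else 0
    if 4 ≤ Count' then 1 else IP_URL_loop Count' rest

def IP_URL (URL_Tokens : List String) : Int := IP_URL_loop 0 URL_Tokens

-- ===== PORT B =====
-- inner while: take the maximal run of flags equal to the head flag, recurse on the remainder
def IP_URL_groups : List Bool → List (Bool × Nat)
  | [] => []
  | b :: bs =>
    (b, 1 + (bs.takeWhile (· == b)).length) :: IP_URL_groups (bs.dropWhile (· == b))
termination_by l => l.length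
decreasing_by
  simpa using Nat.lt_succ_of_le (List.length_dropWhile_le _ _)

def IP_URL_alt (URL_Tokens : List String) : Int :=
  let flags := URL_Tokens.map PySem.Str.strIsdigit
  if (IP_URL_groups flags).any (fun p => p.1 && decide (4 ≤ p.2)) then 1 else 0

-- ===== PRECONDITION & SPEC =====
def Spec_IP_URL (URL_Tokens : List String) (out : Int) : Prop := out = IP_URL_alt URL_Tokens
instance (URL_Tokens : List String) (out : Int) : Decidable (Spec_IP_URL URL_Tokens out) := by unfold Spec_IP_URL; infer_instance

-- ===== CLAIM (what is proved, stated in full; the proofs are below) =====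
def Claim_equal_IP_URL : Prop := ∀ (URL_Tokens : List String), Dom_IP_URL URL_Tokens → Spec_IP_URL URL_Tokens (IP_URL URL_Tokens)

-- ===== LEMMAS AND PROOFS =====

-- A's loop seen on the list of numeric flags
def pvLoopB (c : Int) : List Bool → Int
  | [] => 0
  | b :: bs =>
    let c' := if b then c + 1 else 0
    if 4 ≤ c' then 1 else pvLoopB c' bs

theorem pvLoop_eq_loopB (ts : List String) : ∀ c, IP_URL_loop c ts = pvLoopB c (ts.map PySem.Str.strIsdigit) := by
  induction ts with
  | nil => intro c; rfl
  | cons t ts ih =>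
    intro c
    simp only [IP_URL_loop, pvLoopB, List.map]
    split_ifs <;> simp [ih]

-- a leading run of trues folds into one threshold test
theorem pvLoopB_true_run (r : List Bool) : ∀ (rest : List Bool) (c : Int), (∀ x ∈ r, x = true) →
    pvLoopB c (true :: (r ++ rest)) =
      if 4 ≤ c + 1 + (r.length : Int) then 1 else pvLoopB (c + 1 + r.length) rest := by
  induction r with
  | nil => intro rest c _; simp [pvLoopB]
  | cons b r ih =>
    intro rest c hall
    have hb : b = true := hall b (by simp)
    subst hb
    have hr : ∀ x ∈ r, x = true := fun x hx => hall x (by simp [hx])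
    have hL : (((true :: r).length : List Bool → ℕ) (true :: r) : Int) = 1 + r.length := by
      simp; ring
    show (if 4 ≤ c + 1 then 1 else pvLoopB (c + 1) (true :: (r ++ rest))) = _
    rw [ih rest (c + 1) hr]
    simp only [List.length_cons]
    have harith : c + 1 + 1 + (r.length : Int) = c + 1 + ((r.length + 1 : ℕ) : Int) := by
      push_cast; ring
    split_ifs with h1 h2 h3 <;> first | rfl | (exfalso; omega) | (rw [harith])

-- a leading run of falses is skipped with the counter reset
theorem pvLoopB_false_run (r : List Bool) : ∀ (rest : List Bool) (c : Int), (∀ x ∈ r, x = false) →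
    pvLoopB c (false :: (r ++ rest)) = pvLoopB 0 rest := by
  induction r with
  | nil => intro rest c _; simp [pvLoopB]
  | cons b r ih =>
    intro rest c hall
    have hb : b = false := hall b (by simp)
    subst hb
    have hr : ∀ x ∈ r, x = false := fun x hx => hall x (by simp [hx])
    show pvLoopB 0 (false :: (r ++ rest)) = pvLoopB 0 rest
    exact ih rest 0 hr

-- after a maximal run the next flag (if any) differs, so the counter may be reset
theorem pvLoopB_reset (rest : List Bool) (c : Int) (h : rest = [] ∨ rest.head? = some false) :
    pvLoopB c rest = pvLoopB 0 rest := by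
  rcases h with h | h
  · subst h; rfl
  · cases rest with
    | nil => rfl
    | cons b bs =>
      simp at h
      subst h
      rfl

theorem pvHead_dropWhile {α : Type} (p : α → Bool) (l : List α) :
    l.dropWhile p = [] ∨ ∃ a bs, l.dropWhile p = a :: bs ∧ p a = false := by
  induction l with
  | nil => left; rfl
  | cons a l ih =>
    by_cases h : p a
    · simpa [List.dropWhile, h] using ih
    · right; exact ⟨a, l, by simp [List.dropWhile, h], by simp [h]⟩

theorem pvMain (ks : List Bool) :
    pvLoopB 0 ks = if (IP_URL_groups ks).any (fun p => p.1 && decide (4 ≤ p.2)) then 1 else 0 := by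
  induction hn : ks.length using Nat.strong_induction_on generalizing ks with
  | _ n ih =>
  cases ks with
  | nil => simp [pvLoopB, IP_URL_groups]
  | cons b bs =>
    set r := bs.takeWhile (· == b) with hrdef
    set rest := bs.dropWhile (· == b) with hrestdef
    have hsplit : r ++ rest = bs := List.takeWhile_append_dropWhile
    have hall : ∀ x ∈ r, x = b := by
      intro x hx
      have := List.mem_takeWhile_imp hx
      simpa using this
    have hlen : rest.length < n := by
      subst hn
      rw [hrestdef]
      simpa using Nat.lt_succ_of_le (List.length_dropWhile_le _ _)
    have ihrest := ih _ hlen rest rfl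
    have hgroups : IP_URL_groups (b :: bs) = (b, 1 + r.length) :: IP_URL_groups rest := by
      rw [IP_URL_groups]
    rw [hgroups]
    have hhead : rest = [] ∨ ∃ a cs, rest = a :: cs ∧ (a == b) = false := by
      rw [hrestdef]; exact pvHead_dropWhile _ bs
    cases b with
    | false =>
      conv_lhs => rw [show (false :: bs) = false :: (r ++ rest) by rw [hsplit]]
      rw [pvLoopB_false_run r rest 0 hall, ihrest]
      simp only [List.any_cons, Bool.false_and, Bool.false_or]
    | true =>
      conv_lhs => rw [show (true :: bs) = true :: (r ++ rest) by rw [hsplit]]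
      rw [pvLoopB_true_run r rest 0 hall]
      have hreset : pvLoopB (0 + 1 + (r.length : Int)) rest = pvLoopB 0 rest := by
        apply pvLoopB_reset
        rcases hhead with h | ⟨a, cs, h, ha⟩
        · left; exact h
        · right
          have : a = false := by simpa using ha
          rw [h, this]
          rfl
      simp only [List.any_cons, Bool.true_and]
      by_cases h4 : 4 ≤ 1 + r.length
      · rw [if_pos (by push_cast; omega)]
        have : (decide (4 ≤ 1 + r.length)) = true := by simpa using h4
        rw [this, Bool.true_or, if_pos rfl]
      · rw [if_neg (by push_cast; omega), hreset, ihrest]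
        have : (decide (4 ≤ 1 + r.length)) = false := by simpa using h4
        rw [this, Bool.false_or]

-- ===== VERDICT (by name: the statement is the Claim_ definition above) =====
theorem IP_URL_spec : Claim_equal_IP_URL := by
  intro ts _
  show IP_URL ts = IP_URL_alt ts
  rw [IP_URL, IP_URL_alt, pvLoop_eq_loopB, pvMain]
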